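-- pv_equiv track=rewrite | github.com/Garri0106/Programacion | Ej_14.py | BuscarPalabraLarga
-- ===== SOURCE A (Python) =====
-- def BuscarPalabraLarga(cadena):
--     a= [""]
--     palabra=""
--     c=0
--     for i in cadena:
--         if len(i)>=len(palabra):
--             contador=0
--             for j in i:
--                 for k in i:
--                     if k==j:
--                         contador+=1
--                     if c<contador:
--                         c=contador
--                         palabra=i
--                         a.pop(0); a.append(i)
--     return a
-- ===== SOURCE B (Python) =====
-- def BuscarPalabraLarga(cadena):
--     best_score = 0
--     best_len = 0
--     result = [""]
--     for palabra in cadena: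
--         if len(palabra) >= best_len:
--             counts = {}
--             for ch in palabra:
--                 counts[ch] = counts.get(ch, 0) + 1
--             score = sum(v * v for v in counts.values())
--             if score > best_score:
--                 best_score = score
--                 best_len = len(palabra)
--                 result = [palabra]
--     return result
-- ===== Notes on version B (the rewrite author's own statement) =====
-- stated objective: simpler
-- what changed: Replaces A's nested pairwise character comparison with mid-loop best updates by a single pass that scores each word via a character-frequency dict (sum of squared counts) and maintains an explicit (best_score, best_len, result) triple.
import Mathlib
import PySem

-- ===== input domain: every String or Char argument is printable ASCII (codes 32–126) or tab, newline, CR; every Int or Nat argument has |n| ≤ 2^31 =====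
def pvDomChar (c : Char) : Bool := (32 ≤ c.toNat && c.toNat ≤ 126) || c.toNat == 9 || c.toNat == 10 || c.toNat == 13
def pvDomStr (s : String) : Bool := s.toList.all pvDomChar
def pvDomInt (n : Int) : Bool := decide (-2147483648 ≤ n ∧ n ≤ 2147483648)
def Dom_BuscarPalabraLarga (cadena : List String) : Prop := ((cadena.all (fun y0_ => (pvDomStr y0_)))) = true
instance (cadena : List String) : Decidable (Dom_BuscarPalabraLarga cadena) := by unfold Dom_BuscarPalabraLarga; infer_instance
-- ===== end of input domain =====

-- B scores each word with a character-frequency dict (sum of squared counts) and keeps an explicit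
-- (best_score, best_len, result) triple, instead of A's nested pairwise comparison with mid-loop best
-- updates; same return value everywhere (objective: simpler).

-- ===== PORT A =====
-- innermost 'for k in i' body: 'if k==j: contador+=1' then 'if c<contador: c=contador; palabra=i; a.pop(0); a.append(i)'
def pvAStepK (i : String) (j : Char) (s2 : Int × Int × String × List String) (k : Char) :
    Int × Int × String × List String :=
  let (contador, c, palabra, a) := s2
  let contador := if k == j then contador + 1 else contador
  if c < contador then
    -- a.pop(0); a.append(i) — a is always a one-element list here, so pop? never returns none
    (contador, contador, i, (match PySem.List.pop? a 0 with
                             | some (_, rest) => rest ++ [i]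
                             | none => a))
  else (contador, c, palabra, a)

-- outer loop body: 'if len(i) >= len(palabra):' then the nested j/k scan starting at contador = 0
def pvAOuter (st : List String × String × Int) (i : String) : List String × String × Int :=
  let (a, palabra, c) := st
  if PySem.Str.len palabra ≤ PySem.Str.len i then
    let r := i.toList.foldl (fun s j => i.toList.foldl (pvAStepK i j) s) (0, c, palabra, a)
    (r.2.2.2, r.2.2.1, r.2.1)
  else st

def BuscarPalabraLarga (cadena : List String) : List String :=
  (cadena.foldl pvAOuter ([""], "", 0)).1

-- ===== PORT B =====
-- loop body: length gate, dict counting pass, score = sum of squared counts, strict improvement test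
def pvBOuter (st : Int × Int × List String) (palabra : String) : Int × Int × List String :=
  let (bestScore, bestLen, result) := st
  if bestLen ≤ PySem.Str.len palabra then
    let counts := palabra.toList.foldl
      (fun (d : PySem.Dict Char Int) ch => d.insert ch (d.getD ch 0 + 1)) PySem.Dict.empty
    let score := (counts.values.map (fun v => v * v)).sum
    if bestScore < score then (score, PySem.Str.len palabra, [palabra]) else st
  else st

def BuscarPalabraLarga_alt (cadena : List String) : List String :=
  (cadena.foldl pvBOuter (0, 0, [""])).2.2

-- ===== PRECONDITION & SPEC =====
def Spec_BuscarPalabraLarga (cadena : List String) (out : List String) : Prop := out = BuscarPalabraLarga_alt cadena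
instance (cadena : List String) (out : List String) : Decidable (Spec_BuscarPalabraLarga cadena out) := by unfold Spec_BuscarPalabraLarga; infer_instance

-- ===== CLAIM (what is proved, stated in full; the proofs are below) =====
def Claim_equal_BuscarPalabraLarga : Prop := ∀ (cadena : List String), Dom_BuscarPalabraLarga cadena → Spec_BuscarPalabraLarga cadena (BuscarPalabraLarga cadena)

-- ===== LEMMAS AND PROOFS =====

-- the score both programs compute for a word: over every position, that character's count
def pvScore (l : List Char) : Int := (l.map (fun j => (l.count j : Int))).sum

-- one step of A's innermost loop, on a singleton a
lemma pvAStepK_single (i : String) (j k : Char) (ct c : Int) (p w : String) (h : ct ≤ c) :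
    pvAStepK i j (ct, c, p, [w]) k =
      (ct + (if k == j then 1 else 0),
       max c (ct + (if k == j then 1 else 0)),
       if c < ct + (if k == j then 1 else 0) then i else p,
       [if c < ct + (if k == j then 1 else 0) then i else w]) := by
  by_cases hk : k == j <;>
    simp only [pvAStepK, hk, if_true, if_false, PySem.List.pop?_zero_cons] <;>
    split_ifs <;> simp_all <;> omega

-- A's innermost k-loop, fully characterised
lemma pvA_kloop (i : String) (j : Char) (l : List Char) :
    ∀ (contador c : Int) (p w : String), contador ≤ c →
    l.foldl (pvAStepK i j) (contador, c, p, [w]) =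
      (contador + l.count j, max c (contador + l.count j),
       if c < contador + l.count j then i else p,
       [if c < contador + l.count j then i else w]) := by
  induction l with
  | nil =>
    intro ct c p w h
    simp only [List.foldl_nil, List.count_nil, Int.natCast_zero, add_zero]
    rw [max_eq_left h, if_neg (not_lt.mpr h), if_neg (not_lt.mpr h)]
  | cons x t ih =>
    intro ct c p w h
    have hcnt : (0:Int) ≤ t.count j := by positivity
    rw [List.foldl_cons, pvAStepK_single i j x ct c p w h,
        ih _ _ _ _ (le_max_right c _)]
    have hc : (List.count j (x :: t) : Int)
        = (if x == j then 1 else 0) + t.count j := by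
      by_cases hx : x == j <;> simp [List.count_cons, hx] <;> omega
    rw [hc]
    refine Prod.ext ?_ (Prod.ext ?_ (Prod.ext ?_ ?_)) <;> simp only
    · ring
    · by_cases hx : x == j <;> simp only [hx, if_true, if_false] <;> omega
    · split_ifs <;> first | rfl | omega
    · split_ifs <;> first | rfl | omega

lemma pvA_jloop (i : String) (l : List Char) :
    ∀ (js : List Char) (contador c : Int) (p w : String), contador ≤ c →
    js.foldl (fun s j => l.foldl (pvAStepK i j) s) (contador, c, p, [w]) =
      (contador + (js.map (fun j => (l.count j : Int))).sum,
       max c (contador + (js.map (fun j => (l.count j : Int))).sum),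
       if c < contador + (js.map (fun j => (l.count j : Int))).sum then i else p,
       [if c < contador + (js.map (fun j => (l.count j : Int))).sum then i else w]) := by
  intro js
  induction js with
  | nil =>
    intro ct c p w h
    simp only [List.foldl_nil, List.map_nil, List.sum_nil, add_zero]
    rw [max_eq_left h, if_neg (not_lt.mpr h), if_neg (not_lt.mpr h)]
  | cons j js ih =>
    intro ct c p w h
    have hcnt : (0:Int) ≤ l.count j := by positivity
    have hsum : (0:Int) ≤ (js.map (fun j => (l.count j : Int))).sum := by
      apply List.sum_nonneg; intro x hx
      obtain ⟨y, _, rfl⟩ := List.mem_map.mp hx; positivity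
    rw [List.foldl_cons, pvA_kloop i j l ct c p w h,
        ih _ _ _ _ (le_max_right c _)]
    simp only [List.map_cons, List.sum_cons]
    refine Prod.ext ?_ (Prod.ext ?_ (Prod.ext ?_ ?_)) <;> simp only
    · ring
    · omega
    · split_ifs <;> first | rfl | omega
    · split_ifs <;> first | rfl | omega

-- the dedup identity: sum over all positions of count = sum over distinct chars of count squared
lemma pvScore_eq_dedup (l : List Char) :
    pvScore l = ((PySem.Set.ofList l).map (fun k => (l.count k : Int) * (l.count k : Int))).sum := by
  have h1 := Finset.sum_list_map_count l (fun j => (l.count j : Int))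
  have h2 := List.sum_toFinset (l := PySem.Set.ofList l)
      (fun k => (l.count k : Int) * (l.count k : Int)) (PySem.Set.nodup_ofList l)
  have hfs : (PySem.Set.ofList l).toFinset = l.toFinset := by
    ext x; simp [List.mem_toFinset, PySem.Set.mem_ofList]
  rw [pvScore, h1, ← h2, hfs]
  refine Finset.sum_congr rfl fun m _ => ?_
  simp

-- B's score for a word equals pvScore
lemma pvB_score (l : List Char) :
    (((l.foldl (fun (d : PySem.Dict Char Int) ch => d.insert ch (d.getD ch 0 + 1))
        PySem.Dict.empty).values.map (fun v => v * v)).sum) = pvScore l := by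
  rw [PySem.Dict.foldl_insert_getD_add_one_eq_counter, pvScore_eq_dedup l]
  simp [PySem.Dict.values, PySem.Dict.items_counter, List.map_map, Function.comp_def]

lemma pvScore_nonneg (l : List Char) : 0 ≤ pvScore l := by
  apply List.sum_nonneg; intro x hx
  obtain ⟨y, _, rfl⟩ := List.mem_map.mp hx; positivity

-- the outer folds stay in lock-step: A's (a, palabra, c) corresponds to B's (c, len palabra, [palabra])
lemma pv_main (cadena : List String) :
    ∀ (p : String) (c : Int), 0 ≤ c →
    cadena.foldl pvAOuter ([p], p, c) =
      (let r := cadena.foldl pvBOuter (c, PySem.Str.len p, [p])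
       (r.2.2, r.2.2.headD "", r.1)) := by
  induction cadena with
  | nil => intro p c _; simp
  | cons i t ih =>
    intro p c hc
    simp only [List.foldl_cons]
    by_cases hlen : PySem.Str.len p ≤ PySem.Str.len i
    · have hA : pvAOuter ([p], p, c) i =
          ([if c < pvScore i.toList then i else p],
           if c < pvScore i.toList then i else p,
           max c (pvScore i.toList)) := by
        rw [pvAOuter]
        simp only [if_pos hlen]
        rw [pvA_jloop i i.toList i.toList 0 c p p hc]
        simp [pvScore]
      have hB : pvBOuter (c, PySem.Str.len p, [p]) i =
          if c < pvScore i.toList then (pvScore i.toList, PySem.Str.len i, [i])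
          else (c, PySem.Str.len p, [p]) := by
        rw [pvBOuter]
        simp only [if_pos hlen, pvB_score i.toList]
      rw [hA, hB]
      by_cases hlt : c < pvScore i.toList
      · simp only [if_pos hlt, max_eq_right (le_of_lt hlt)]
        exact ih i (pvScore i.toList) (pvScore_nonneg _)
      · simp only [if_neg hlt, max_eq_left (not_lt.mp hlt)]
        exact ih p c hc
    · have hA : pvAOuter ([p], p, c) i = ([p], p, c) := by
        rw [pvAOuter]; simp only [if_neg hlen]
      have hB : pvBOuter (c, PySem.Str.len p, [p]) i = (c, PySem.Str.len p, [p]) := by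
        rw [pvBOuter]; simp only [if_neg hlen]
      rw [hA, hB]; exact ih p c hc

-- ===== VERDICT (by name: the statement is the Claim_ definition above) =====
theorem BuscarPalabraLarga_spec : Claim_equal_BuscarPalabraLarga := by
  intro cadena _
  unfold Spec_BuscarPalabraLarga BuscarPalabraLarga BuscarPalabraLarga_alt
  have h0 : PySem.Str.len "" = 0 := by decide
  rw [show ((0 : Int), (0 : Int), ([""] : List String)) = (0, PySem.Str.len "", [""]) by rw [h0],
      pv_main cadena "" 0 le_rfl]
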